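-- pv_equiv track=rewrite | github.com/baohuynh12056/HashDuplicationImage | Application/cluster.py | merge_similar_buckets
-- ===== SOURCE A (Python) =====
-- def merge_similar_buckets(hashtable, threshold=1):
--     """
--     Gom các bucket có hash_value gần nhau (Hamming distance <= threshold).
--     Trả về list các nhóm (mỗi nhóm là list tên ảnh).
--     """
--     hash_keys = list(hashtable.keys())
--     merged = set()
--     groups = []
--
--     for i, h1 in enumerate(hash_keys):
--         if h1 in merged:
--             continue
--
--         # Nhóm mới bắt đầu từ bucket hiện tại
--         group = list(hashtable[h1])
--         merged.add(h1)
--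
--         # So sánh với các bucket khác
--         for j, h2 in enumerate(hash_keys):
--             if h2 in merged:
--                 continue
--             if hamming_distance(h1, h2) <= threshold:
--                 group.extend(hashtable[h2])
--                 merged.add(h2)
--
--         groups.append(group)
--
--     return groups
--
-- def hamming_distance(a: int, b: int) -> int:
--     return bin(a ^ b).count('1')
-- ===== SOURCE B (Python) =====
-- def merge_similar_buckets(hashtable, threshold=1):
--     # worklist version: each bucket is examined once and removed when grouped
--     items = list(hashtable.items())
--     groups = []
--     while items:
--         h, names = items[0]
--         rest = items[1:]
--         group = names + [img for k, vs in rest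
--                          if bin(h ^ k).count('1') <= threshold for img in vs]
--         groups.append(group)
--         items = [(k, vs) for k, vs in rest
--                  if not bin(h ^ k).count('1') <= threshold]
--     return groups
-- ===== Notes on version B (the rewrite author's own statement) =====
-- stated objective: simpler
-- what changed: Replaces the merged-set bookkeeping with nested full scans over all keys by a shrinking worklist: each seed bucket absorbs the Hamming-close buckets of the remaining list and only the far ones are carried to the next round, so no merged set and no skip-scans are needed.
import Mathlib
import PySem

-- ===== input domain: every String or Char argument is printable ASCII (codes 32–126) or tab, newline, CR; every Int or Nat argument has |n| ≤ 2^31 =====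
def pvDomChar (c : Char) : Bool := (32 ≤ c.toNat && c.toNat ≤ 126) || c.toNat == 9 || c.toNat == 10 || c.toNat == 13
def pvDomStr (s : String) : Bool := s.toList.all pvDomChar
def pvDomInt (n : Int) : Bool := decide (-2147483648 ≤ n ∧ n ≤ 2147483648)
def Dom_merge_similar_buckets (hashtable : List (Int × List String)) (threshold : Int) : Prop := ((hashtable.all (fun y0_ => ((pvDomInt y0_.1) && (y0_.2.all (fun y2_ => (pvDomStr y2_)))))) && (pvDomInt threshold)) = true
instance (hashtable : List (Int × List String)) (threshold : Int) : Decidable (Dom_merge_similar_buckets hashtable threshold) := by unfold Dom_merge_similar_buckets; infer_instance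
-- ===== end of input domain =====

-- B replaces A's merged-set bookkeeping and repeated full scans by a shrinking worklist:
-- each seed absorbs the close buckets of the remaining list and only the far ones are kept.

-- ===== PORT A =====
-- bin(a ^ b).count('1'): the binary string shows the digits of |a ^ b|, so this is bit_count
-- of the xor, which PySem.Int.bitCount computes Python-exactly (it reads |n|).
def hamming_distance (a : Int) (b : Int) : Int :=
  ((PySem.Int.bitCount (PySem.Int.bxor a b) : Nat) : Int)

def merge_similar_buckets (hashtable : List (Int × List String)) (threshold : Int) : List (List String) :=
  let d := PySem.Dict.ofList hashtable
  let hash_keys := d.keys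
  -- state: (merged : set, groups); 'continue' = return the state unchanged
  let st := hash_keys.foldl (fun (st : PySem.Set Int × List (List String)) h1 =>
    if PySem.Set.contains st.1 h1 then st
    else
      -- hashtable[h1]: h1 is a key of d, so the lookup cannot raise; getD is exact here
      let inner := hash_keys.foldl (fun (st2 : List String × PySem.Set Int) h2 =>
        if PySem.Set.contains st2.2 h2 then st2
        else if hamming_distance h1 h2 ≤ threshold then
          (st2.1 ++ d.getD h2 [], PySem.Set.add st2.2 h2)
        else st2) (d.getD h1 [], PySem.Set.add st.1 h1)
      (inner.2, st.2 ++ [inner.1])) (PySem.Set.empty, [])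
  st.2

-- ===== PORT B =====
-- the while-loop of Source B: head of the worklist seeds a group, close buckets are
-- absorbed, far ones form the next worklist
def merge_similar_buckets_alt_go (threshold : Int) : List (Int × List String) → List (List String)
  | [] => []
  | (h, names) :: rest =>
      (names ++ (rest.filter (fun p =>
          ((PySem.Int.bitCount (PySem.Int.bxor h p.1) : Nat) : Int) ≤ threshold)).flatMap (·.2)) ::
      merge_similar_buckets_alt_go threshold
        (rest.filter (fun p =>
          ¬ ((PySem.Int.bitCount (PySem.Int.bxor h p.1) : Nat) : Int) ≤ threshold))
  termination_by l => l.length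
  decreasing_by
    simp only [List.length_cons, List.length_unattach]
    exact Nat.lt_succ_of_le (le_trans (List.length_filter_le _ _) (by simp))

def merge_similar_buckets_alt (hashtable : List (Int × List String)) (threshold : Int) : List (List String) :=
  merge_similar_buckets_alt_go threshold (PySem.Dict.ofList hashtable).items

-- ===== PRECONDITION & SPEC =====
def Spec_merge_similar_buckets (hashtable : List (Int × List String)) (threshold : Int) (out : List (List String)) : Prop := out = merge_similar_buckets_alt hashtable threshold
instance (hashtable : List (Int × List String)) (threshold : Int) (out : List (List String)) : Decidable (Spec_merge_similar_buckets hashtable threshold out) := by unfold Spec_merge_similar_buckets; infer_instance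

-- ===== CLAIM (what is proved, stated in full; the proofs are below) =====
def Claim_equal_merge_similar_buckets : Prop := ∀ (hashtable : List (Int × List String)) (threshold : Int), Dom_merge_similar_buckets hashtable threshold → Spec_merge_similar_buckets hashtable threshold (merge_similar_buckets hashtable threshold)

-- ===== LEMMAS AND PROOFS =====

-- abbreviation used only in the proofs: the closeness test
def pvClose (t : Int) (h k : Int) : Bool :=
  decide (((PySem.Int.bitCount (PySem.Int.bxor h k) : Nat) : Int) ≤ t)

lemma contains_add_ne (S : PySem.Set Int) (k x : Int) (h : x ≠ k) :
    (PySem.Set.add S k).contains x = S.contains x := by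
  rw [Bool.eq_iff_iff, PySem.Set.contains_iff, PySem.Set.contains_iff, PySem.Set.mem_add]
  exact ⟨fun hm => hm.resolve_right h, Or.inl⟩

lemma inner_fold_eq (d : PySem.Dict Int (List String)) (t h1 : Int) :
    ∀ (ks : List Int), ks.Nodup → ∀ (g : List String) (S : PySem.Set Int),
    ks.foldl (fun (st2 : List String × PySem.Set Int) h2 =>
        if PySem.Set.contains st2.2 h2 then st2
        else if hamming_distance h1 h2 ≤ t then
          (st2.1 ++ d.getD h2 [], PySem.Set.add st2.2 h2)
        else st2) (g, S)
    = (g ++ ((ks.filter (fun k => !PySem.Set.contains S k && pvClose t h1 k)).map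
            (fun k => d.getD k [])).flatten,
       PySem.Set.update S (ks.filter (fun k => pvClose t h1 k))) := by
  intro ks
  induction ks with
  | nil => intro _ g S; simp [PySem.Set.update]
  | cons k ks ih =>
    intro hnd g S
    obtain ⟨hk, hnd'⟩ := List.nodup_cons.mp hnd
    have hfc : ∀ (p : Int → Bool), (k :: ks).filter p = if p k then k :: ks.filter p else ks.filter p :=
      fun p => List.filter_cons
    simp only [List.foldl_cons, hfc]
    by_cases hc : PySem.Set.contains S k = true
    · have hmem : k ∈ S := (PySem.Set.contains_iff S k).mp hc
      rw [if_pos hc, ih hnd' g S, hc]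
      by_cases hcl : pvClose t h1 k = true
      · rw [if_pos hcl, PySem.Set.update_cons, PySem.Set.add_of_mem hmem]
        simp
      · rw [if_neg hcl]
        simp
    · have hmem : k ∉ S := fun h => hc ((PySem.Set.contains_iff S k).mpr h)
      rw [if_neg hc]
      by_cases hcl : pvClose t h1 k = true
      · have hcl' : hamming_distance h1 k ≤ t := by
          simpa [pvClose, hamming_distance] using hcl
        rw [if_pos hcl', ih hnd' _ _, if_pos hcl]
        rw [List.filter_congr (l := ks)
            (p := fun k' => !PySem.Set.contains (PySem.Set.add S k) k' && pvClose t h1 k')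
            (q := fun k' => !PySem.Set.contains S k' && pvClose t h1 k')
            (fun x hx => by simp only [contains_add_ne S k x (fun h => hk (h ▸ hx))])]
        rw [PySem.Set.update_cons]
        simp [hmem, hcl, List.append_assoc]
      · have hcl' : ¬ hamming_distance h1 k ≤ t := by
          simpa [pvClose, hamming_distance] using hcl
        rw [if_neg hcl', ih hnd' g S, if_neg hcl]
        simp [hmem, hcl]

lemma outer_fold_eq (d : PySem.Dict Int (List String)) (t : Int) (K : List Int) (hK : K.Nodup) :
    ∀ (ks' P : List Int), K = P ++ ks' →
    ∀ (S : PySem.Set Int) (gs : List (List String)),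
    (∀ k ∈ P, PySem.Set.contains S k = true) →
    (ks'.foldl (fun (st : PySem.Set Int × List (List String)) h1 =>
      if PySem.Set.contains st.1 h1 then st
      else
        let inner := K.foldl (fun (st2 : List String × PySem.Set Int) h2 =>
          if PySem.Set.contains st2.2 h2 then st2
          else if hamming_distance h1 h2 ≤ t then
            (st2.1 ++ d.getD h2 [], PySem.Set.add st2.2 h2)
          else st2) (d.getD h1 [], PySem.Set.add st.1 h1)
        (inner.2, st.2 ++ [inner.1])) (S, gs)).2
    = gs ++ merge_similar_buckets_alt_go t
        ((ks'.filter (fun k => !PySem.Set.contains S k)).map (fun k => (k, d.getD k []))) := by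
  intro ks'
  induction ks' with
  | nil => intro P hKeq S gs hP; simp [merge_similar_buckets_alt_go]
  | cons h rest ih =>
    intro P hKeq S gs hP
    have hKeq' : K = (P ++ [h]) ++ rest := by simp [hKeq]
    have hKnd : (P ++ h :: rest).Nodup := hKeq ▸ hK
    obtain ⟨hPnd, hhr, hdisj⟩ := List.nodup_append.mp hKnd
    obtain ⟨hhrest, hrestnd⟩ := List.nodup_cons.mp hhr
    simp only [List.foldl_cons]
    by_cases hc : PySem.Set.contains S h = true
    · rw [if_pos hc, ih (P ++ [h]) hKeq' S gs
        (by intro k hk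
            rcases List.mem_append.mp hk with hk | hk
            · exact hP k hk
            · simpa [List.mem_singleton.mp hk] using hc)]
      rw [List.filter_cons]
      simp [(PySem.Set.contains_iff S h).mp hc]
    · rw [if_neg hc]
      have hKnd' : K.Nodup := hK
      rw [inner_fold_eq d t h K hKnd' (d.getD h []) (PySem.Set.add S h)]
      -- simplify the two components of the inner result
      have hmemSh : ∀ x ∈ S, x ∈ PySem.Set.add S h := fun x hx => (PySem.Set.mem_add S h x).mpr (Or.inl hx)
      have hfilt1 : K.filter (fun k => !PySem.Set.contains (PySem.Set.add S h) k && pvClose t h k)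
          = rest.filter (fun k => !PySem.Set.contains S k && pvClose t h k) := by
        rw [hKeq, List.filter_append, List.filter_cons]
        have hP0 : P.filter (fun k => !PySem.Set.contains (PySem.Set.add S h) k && pvClose t h k) = [] := by
          rw [List.filter_eq_nil_iff]
          intro k hk
          have : PySem.Set.contains (PySem.Set.add S h) k = true :=
            (PySem.Set.contains_iff _ _).mpr (hmemSh k ((PySem.Set.contains_iff _ _).mp (hP k hk)))
          simp only [this, Bool.not_true, Bool.false_and]
          exact Bool.false_ne_true
        have hh0 : PySem.Set.contains (PySem.Set.add S h) h = true :=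
          (PySem.Set.contains_iff _ _).mpr ((PySem.Set.mem_add S h h).mpr (Or.inr rfl))
        rw [hP0, List.nil_append, hh0]
        simp only [Bool.not_true, Bool.false_and, Bool.false_eq_true, if_false]
        exact List.filter_congr (fun x hx => by
          simp only [contains_add_ne S h x (fun e => hhrest (e ▸ hx))])
      rw [hfilt1]
      set S' := PySem.Set.update (PySem.Set.add S h) (K.filter (fun k => pvClose t h k)) with hS'
      have hS'mem : ∀ x, PySem.Set.contains S' x = true ↔ (x ∈ S ∨ x = h ∨ (x ∈ K ∧ pvClose t h x = true)) := by
        intro x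
        rw [hS', PySem.Set.contains_iff, PySem.Set.mem_update, PySem.Set.mem_add, List.mem_filter]
        tauto
      rw [ih (P ++ [h]) hKeq' S' (gs ++ [_])
        (by intro k hk
            rcases List.mem_append.mp hk with hk | hk
            · exact (hS'mem k).mpr (Or.inl ((PySem.Set.contains_iff _ _).mp (hP k hk)))
            · exact (hS'mem k).mpr (Or.inr (Or.inl (List.mem_singleton.mp hk))))]
      -- rewrite the remaining worklist filter
      have hfilt2 : rest.filter (fun k => !PySem.Set.contains S' k)
          = (rest.filter (fun k => !PySem.Set.contains S k)).filter (fun k => !pvClose t h k) := by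
        rw [List.filter_filter]
        refine List.filter_congr (fun x hx => ?_)
        have hxK : x ∈ K := by rw [hKeq]; exact List.mem_append.mpr (Or.inr (List.mem_cons_of_mem _ hx))
        have hxh : x ≠ h := fun e => hhrest (e ▸ hx)
        have hiff : PySem.Set.contains S' x = true ↔ (PySem.Set.contains S x = true ∨ pvClose t h x = true) := by
          rw [hS'mem x]
          constructor
          · rintro (hx1 | hx1 | ⟨_, hx1⟩)
            · exact Or.inl ((PySem.Set.contains_iff _ _).mpr hx1)
            · exact absurd hx1 hxh
            · exact Or.inr hx1
          · rintro (hx1 | hx1)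
            · exact Or.inl ((PySem.Set.contains_iff _ _).mp hx1)
            · exact Or.inr (Or.inr ⟨hxK, hx1⟩)
        cases hS's : PySem.Set.contains S' x <;> cases hSx : PySem.Set.contains S x <;>
          cases hclx : pvClose t h x <;> simp_all
      rw [hfilt2]
      have hch : (!PySem.Set.contains S h) = true := by
        cases hcb : PySem.Set.contains S h
        · rfl
        · exact absurd hcb hc
      rw [List.filter_cons, if_pos hch, List.map_cons, merge_similar_buckets_alt_go]
      have hnl : ∀ x : Int, (!decide (x ≤ t)) = decide (t < x) := fun x => by
        rw [← decide_not]; simp [not_le]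
      simp [pvClose, List.filter_map, List.filter_filter, List.flatMap_def, List.append_assoc, Bool.and_comm, Function.comp_def, hnl]

-- ===== VERDICT (by name: the statement is the Claim_ definition above) =====
theorem merge_similar_buckets_spec : Claim_equal_merge_similar_buckets := by
  intro ht t _
  unfold Spec_merge_similar_buckets merge_similar_buckets merge_similar_buckets_alt
  have hnd : (PySem.Dict.ofList ht).keys.Nodup := PySem.Dict.nodup_keys_ofList ht
  rw [outer_fold_eq (PySem.Dict.ofList ht) t (PySem.Dict.ofList ht).keys hnd
      (PySem.Dict.ofList ht).keys [] rfl PySem.Set.empty [] (by intro k hk; cases hk)]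
  have hfull : (PySem.Dict.ofList ht).keys.filter
      (fun k => !PySem.Set.contains PySem.Set.empty k) = (PySem.Dict.ofList ht).keys :=
    List.filter_eq_self.mpr (fun k _ => rfl)
  rw [hfull, ← PySem.Dict.items_eq_map_keys (PySem.Dict.ofList ht) hnd []]
  simp
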